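-- pv_equiv track=rewrite | github.com/hypertypes2/Algorithms | 프로그래머스/unrated/138476. 귤 고르기/귤 고르기.py | solution
-- ===== SOURCE A (Python) =====
-- import collections
--
-- def solution(k, tangerine):
--     C=collections.Counter(tangerine)
--     C=sorted(C.items(),key=lambda x:x[1],reverse=True)
--     put=0
--     for i in range(len(C)):
--         put+=C[i][1]
--         if put>=k:
--             return i+1
--         continue
-- ===== SOURCE B (Python) =====
-- def solution(k, tangerine):
--     counts = {}
--     for t in tangerine:
--         counts[t] = counts.get(t, 0) + 1
--     buckets = {}
--     maxc = 0
--     for c in counts.values():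
--         buckets[c] = buckets.get(c, 0) + 1
--         if c > maxc:
--             maxc = c
--     total = 0
--     types = 0
--     c = maxc
--     while c >= 1:
--         for _ in range(buckets.get(c, 0)):
--             types += 1
--             total += c
--             if total >= k:
--                 return types
--         c -= 1
-- ===== Notes on version B (the rewrite author's own statement) =====
-- stated objective: alternative
-- what changed: Replaces sorting the Counter items by frequency with a count-histogram (bucket) traversal: B builds buckets[c] = number of types with frequency c while tracking the maximum count, then walks c from the maximum down to 1, consuming each bucket until the running total reaches k.
-- outside the precondition, e.g. on solution(5, [1, 1]): A returns None, B returns None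
import Mathlib
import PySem

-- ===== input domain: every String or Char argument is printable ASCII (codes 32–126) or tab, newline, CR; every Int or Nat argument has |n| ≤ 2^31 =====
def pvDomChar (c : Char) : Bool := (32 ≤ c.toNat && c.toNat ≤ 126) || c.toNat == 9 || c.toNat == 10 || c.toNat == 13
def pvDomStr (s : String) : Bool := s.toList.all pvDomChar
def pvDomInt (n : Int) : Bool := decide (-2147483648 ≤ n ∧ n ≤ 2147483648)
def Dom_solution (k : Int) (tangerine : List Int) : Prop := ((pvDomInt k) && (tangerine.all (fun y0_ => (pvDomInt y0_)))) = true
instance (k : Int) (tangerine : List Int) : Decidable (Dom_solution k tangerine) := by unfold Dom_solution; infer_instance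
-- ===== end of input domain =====

-- B replaces the sort-by-frequency scan with a count-histogram walked from the maximum count down (alternative algorithm, similar cost).


-- ===== PORT A =====
-- for i in range(len(C)): put += C[i][1]; if put >= k: return i+1   (0 = the unreachable fall-through, excluded by Pre_)
def aLoop (k : Int) : List (Int × Int) → Int → Int → Int
  | [], _, _ => 0
  | p :: rest, put, i =>
      let put' := put + p.2
      if put' ≥ k then i + 1 else aLoop k rest put' (i + 1)

def solution (k : Int) (tangerine : List Int) : Int :=
  let C := (PySem.Dict.counter tangerine).items
  let Cs := PySem.List.sorted C (fun x => x.2) true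
  aLoop k Cs 0 0

-- ===== PORT B =====
-- for _ in range(buckets.get(c, 0)): types += 1; total += c; if total >= k: return types
def bInner (k c : Int) : Nat → Int → Int → Option Int × Int × Int
  | 0, total, types => (none, total, types)
  | n + 1, total, types =>
      let types' := types + 1
      let total' := total + c
      if total' ≥ k then (some types', total', types') else bInner k c n total' types'

-- while c >= 1: …inner…; c -= 1   (counting c down from maxc; 0 = the unreachable fall-through)
def bOuter (k : Int) (buckets : PySem.Dict Int Int) : Nat → Int → Int → Int
  | 0, _, _ => 0
  | c + 1, total, types =>
      match bInner k ((c : Int) + 1) ((buckets.getD ((c : Int) + 1) 0).toNat) total types with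
      | (some ans, _, _) => ans
      | (none, total', types') => bOuter k buckets c total' types'

def solution_alt (k : Int) (tangerine : List Int) : Int :=
  let counts := tangerine.foldl (fun d t => d.insert t (d.getD t 0 + 1)) PySem.Dict.empty
  let bm := counts.values.foldl
      (fun (p : PySem.Dict Int Int × Int) c =>
        (p.1.insert c (p.1.getD c 0 + 1), if c > p.2 then c else p.2))
      (PySem.Dict.empty, 0)
  bOuter k bm.1 bm.2.toNat 0 0

-- ===== PRECONDITION & SPEC =====
-- Pre_ excludes exactly the inputs (k > len(tangerine), or empty tangerine) on which Python A
-- falls through the loop and returns None, which is not a value of the declared int type.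
def Pre_solution (k : Int) (tangerine : List Int) : Prop :=
  tangerine ≠ [] ∧ k ≤ tangerine.length
instance (k : Int) (tangerine : List Int) : Decidable (Pre_solution k tangerine) := by
  unfold Pre_solution; infer_instance
def pvWitness_solution : Int × List Int := (2, [3, 3, 5])

def Spec_solution (k : Int) (tangerine : List Int) (out : Int) : Prop := out = solution_alt k tangerine
instance (k : Int) (tangerine : List Int) (out : Int) : Decidable (Spec_solution k tangerine out) := by unfold Spec_solution; infer_instance

-- ===== CLAIM (what is proved, stated in full; the proofs are below) =====
def Claim_equal_solution : Prop := ∀ (k : Int) (tangerine : List Int), Dom_solution k tangerine → Pre_solution k tangerine → Spec_solution k tangerine (solution k tangerine)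

-- ===== LEMMAS AND PROOFS =====

-- the common abstraction: scan a list of counts, stop when the running sum reaches k
def scan (k : Int) : List Int → Int → Int → Int
  | [], _, _ => 0
  | c :: rest, put, i => if put + c ≥ k then i + 1 else scan k rest (put + c) (i + 1)

-- the descending count sequence B consumes
def descL (b : PySem.Dict Int Int) : Nat → List Int
  | 0 => []
  | n + 1 => List.replicate ((b.getD ((n : Int) + 1) 0).toNat) ((n : Int) + 1) ++ descL b n

lemma aLoop_eq_scan (k : Int) : ∀ (xs : List (Int × Int)) (put i : Int),
    aLoop k xs put i = scan k (xs.map Prod.snd) put i := by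
  intro xs; induction xs with
  | nil => intro put i; rfl
  | cons p rest ih =>
      intro put i
      simp only [aLoop, scan, List.map_cons]
      split <;> simp [ih]

lemma bInner_eq_scan (k c : Int) : ∀ (n : Nat) (total types : Int) (rest : List Int),
    scan k (List.replicate n c ++ rest) total types =
      (match bInner k c n total types with
       | (some a, _, _) => a
       | (none, t', ty') => scan k rest t' ty') := by
  intro n; induction n with
  | zero => intro total types rest; rfl
  | succ m ih =>
      intro total types rest
      simp only [List.replicate_succ, List.cons_append, scan, bInner]
      split
      · rfl
      · exact ih _ _ _

lemma bOuter_eq_scan (k : Int) (b : PySem.Dict Int Int) :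
    ∀ (fuel : Nat) (total types : Int),
      bOuter k b fuel total types = scan k (descL b fuel) total types := by
  intro fuel; induction fuel with
  | zero => intro total types; rfl
  | succ m ih =>
      intro total types
      simp only [bOuter, descL, bInner_eq_scan]
      split <;> simp_all

lemma mem_descL_le (b : PySem.Dict Int Int) :
    ∀ (fuel : Nat) (x : Int), x ∈ descL b fuel → 1 ≤ x ∧ x ≤ (fuel : Int) := by
  intro fuel; induction fuel with
  | zero => intro x hx; simp [descL] at hx
  | succ m ih =>
      intro x hx
      simp only [descL, List.mem_append, List.mem_replicate] at hx
      rcases hx with ⟨-, rfl⟩ | hx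
      · omega
      · have := ih x hx; omega

lemma pairwise_descL (b : PySem.Dict Int Int) :
    ∀ (fuel : Nat), (descL b fuel).Pairwise (· ≥ ·) := by
  intro fuel; induction fuel with
  | zero => simp [descL]
  | succ m ih =>
      simp only [descL]
      refine List.pairwise_append.mpr ⟨?_, ih, ?_⟩
      · exact List.pairwise_replicate.mpr (Or.inr le_rfl)
      · intro x hx y hy
        have hx' := (List.mem_replicate.mp hx).2
        have hy' := mem_descL_le b m y hy
        omega

lemma count_descL (b : PySem.Dict Int Int) :
    ∀ (fuel : Nat) (x : Int),
      (descL b fuel).count x =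
        if 1 ≤ x ∧ x ≤ (fuel : Int) then (b.getD x 0).toNat else 0 := by
  intro fuel; induction fuel with
  | zero => intro x; simp [descL]; omega
  | succ m ih =>
      intro x
      simp only [descL, List.count_append, List.count_replicate, ih]
      push_cast
      all_goals split_ifs <;> first | rfl | omega | (exfalso; omega) | (simp_all <;> omega) | simp_all

-- the componentwise reading of B's combined (buckets, maxc) fold
lemma bm_fold_eq (V : List Int) :
    ∀ (d : PySem.Dict Int Int) (m : Int),
      V.foldl (fun (p : PySem.Dict Int Int × Int) c =>
          (p.1.insert c (p.1.getD c 0 + 1), if c > p.2 then c else p.2)) (d, m)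
        = (V.foldl (fun d c => d.insert c (d.getD c 0 + 1)) d,
           V.foldl (fun m c => if c > m then c else m) m) := by
  induction V with
  | nil => intro d m; rfl
  | cons c rest ih => intro d m; simp only [List.foldl_cons, ih]

lemma foldl_max_le (V : List Int) :
    ∀ (m : Int), m ≤ V.foldl (fun m c => if c > m then c else m) m ∧
      ∀ x ∈ V, x ≤ V.foldl (fun m c => if c > m then c else m) m := by
  induction V with
  | nil => intro m; simp
  | cons c rest ih =>
      intro m
      simp only [List.foldl_cons, List.mem_cons]
      have h := ih (if c > m then c else m)
      constructor
      · exact le_trans (by split <;> omega) h.1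
      · rintro x (rfl | hx)
        · exact le_trans (by split <;> omega) h.1
        · exact h.2 x hx

lemma mem_values_counter (xs : List Int) (x : Int) (hx : x ∈ (PySem.Dict.counter xs).values) :
    1 ≤ x := by
  have hv : (PySem.Dict.counter xs).values = (PySem.Dict.counter xs).items.map Prod.snd := rfl
  rw [hv, PySem.Dict.items_counter] at hx
  simp only [List.map_map, List.mem_map] at hx
  obtain ⟨key, hk, rfl⟩ := hx
  have : key ∈ xs := (PySem.Set.mem_ofList _ _).mp hk
  have : 1 ≤ xs.count key := List.one_le_count_iff.mpr this
  simp only [Function.comp]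
  exact_mod_cast this

-- main bridge: the descending histogram walk consumes exactly the counts sorted descending
lemma descL_eq_sorted_counts (xs : List Int) :
    descL (PySem.Dict.counter (PySem.Dict.counter xs).values)
        ((((PySem.Dict.counter xs).values.foldl (fun m c => if c > m then c else m) 0)).toNat)
      = (PySem.List.sorted (PySem.Dict.counter xs).items (fun p => p.2) true).map Prod.snd := by
  set V := (PySem.Dict.counter xs).values with hV
  set M := (V.foldl (fun m c => if c > m then c else m) 0) with hM
  set b := PySem.Dict.counter V with hb
  have hM0 : 0 ≤ M := (foldl_max_le V 0).1
  have hMtop : ∀ x ∈ V, x ≤ M := (foldl_max_le V 0).2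
  -- descL ~ V
  have hperm : (descL b M.toNat).Perm V := by
    rw [List.perm_iff_count]
    intro x
    rw [count_descL]
    by_cases h : 1 ≤ x ∧ x ≤ (M.toNat : Int)
    · rw [if_pos h, hb, PySem.Dict.getD_counter]
      exact Int.toNat_natCast _
    · rw [if_neg h]
      have hx : x ∉ V := by
        intro hxV
        have h1 := mem_values_counter xs x (hV ▸ hxV)
        have h2 := hMtop x hxV
        omega
      exact (List.count_eq_zero_of_not_mem hx).symm
  -- sorted list ~ V
  have hperm2 : ((PySem.List.sorted (PySem.Dict.counter xs).items (fun p => p.2) true).map Prod.snd).Perm V := by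
    have := PySem.List.sorted_perm (xs := (PySem.Dict.counter xs).items) (key := fun p : Int × Int => p.2) (rev := true)
    exact this.map Prod.snd
  -- both sorted descending, permutations of each other ⇒ equal
  have hs1 : (descL b M.toNat).Pairwise (· ≥ ·) := pairwise_descL b M.toNat
  have hs2 : ((PySem.List.sorted (PySem.Dict.counter xs).items (fun p => p.2) true).map Prod.snd).Pairwise (· ≥ ·) := by
    have := PySem.List.sorted_pairwise_rev (xs := (PySem.Dict.counter xs).items) (key := fun p : Int × Int => p.2)
    exact List.pairwise_map.mpr (by exact this)
  exact (hperm.trans hperm2.symm).eq_of_pairwise (fun _ _ _ _ h1 h2 => le_antisymm h2 h1) hs1 hs2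

lemma solution_eq_alt (k : Int) (tangerine : List Int) :
    solution k tangerine = solution_alt k tangerine := by
  simp only [solution, solution_alt]
  rw [PySem.Dict.foldl_insert_getD_add_one_eq_counter, bm_fold_eq,
    PySem.Dict.foldl_insert_getD_add_one_eq_counter]
  rw [aLoop_eq_scan, bOuter_eq_scan, descL_eq_sorted_counts]

-- ===== VERDICT (by name: the statement is the Claim_ definition above) =====
theorem solution_spec : Claim_equal_solution := by
  intro k tangerine _ _
  unfold Spec_solution
  exact solution_eq_alt k tangerine
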